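-- pv_equiv track=rewrite | github.com/wantingteng/UdemIFT1015tp | tp2 Poker Shuffle.py | troisPoker
-- ===== SOURCE A (Python) =====
-- def troisPoker(tab):
--
--     if tab[0]//4==tab[1]//4==tab[2]//4:
--             value='10'
--             return value
--
--     for i in range(3):
--           if tab[i-1]//4==tab[i]//4:
--             value='2'
--             return value
--
--     else:
--             value=''
--             return value
-- ===== SOURCE B (Python) =====
-- def troisPoker(tab):
--     # Classify by the number of distinct ranks among the first three cards.
--     ranks = {tab[0] // 4, tab[1] // 4, tab[2] // 4}
--     if len(ranks) == 1:
--         return '10'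
--     if len(ranks) == 2:
--         return '2'
--     return ''
-- ===== Notes on version B (the rewrite author's own statement) =====
-- stated objective: simpler
-- what changed: Replaces A's cyclic adjacent-pair index loop (whose wrap-around negative indexing reads the LAST element of the list) by building the set of the first three cards' ranks once and branching on how many distinct ranks it holds.
-- intended difference: On tabs longer than 3 whose first three cards have no adjacent equal ranks, A's wrap-around negative indexing compares against the unrelated last element, returning '2' when that element's rank equals the first card's (spurious pair) or '' when the first and third cards share a rank (missed pair); B returns the classification of the three cards themselves, which is the intended value for a 3-card hand. — e.g. on troisPoker([0, 4, 1, 8]): A returns "", B returns "2"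
import Mathlib
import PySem

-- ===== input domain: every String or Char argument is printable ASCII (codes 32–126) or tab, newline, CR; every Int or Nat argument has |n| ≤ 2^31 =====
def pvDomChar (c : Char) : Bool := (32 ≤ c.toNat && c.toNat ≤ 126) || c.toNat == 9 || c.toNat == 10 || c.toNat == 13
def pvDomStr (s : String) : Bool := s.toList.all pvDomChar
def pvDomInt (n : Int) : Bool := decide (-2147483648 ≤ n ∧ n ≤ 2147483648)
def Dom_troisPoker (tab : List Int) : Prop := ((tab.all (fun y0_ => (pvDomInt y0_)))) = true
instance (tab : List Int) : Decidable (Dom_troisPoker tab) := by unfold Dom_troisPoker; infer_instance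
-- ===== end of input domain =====

set_option maxRecDepth 4000


-- B replaces A's cyclic adjacent-pair loop (whose wrap-around indexing reads the last element) by counting the
-- distinct ranks of the first three cards (objective: simpler).

-- ===== PORT A =====
-- A's 'for i in range(3)' adjacent-pair loop; "" on IndexError (excluded by Pre_)
def troisPokerLoop (tab : List Int) : List Int → String
  | [] => ""
  | i :: rest =>
    match PySem.List.pyGet? tab (i - 1), PySem.List.pyGet? tab i with
    | some x, some y =>
        if PySem.Int.floordiv x 4 = PySem.Int.floordiv y 4 then "2"
        else troisPokerLoop tab rest
    | _, _ => ""

def troisPoker (tab : List Int) : String :=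
  match PySem.List.pyGet? tab 0, PySem.List.pyGet? tab 1, PySem.List.pyGet? tab 2 with
  | some t0, some t1, some t2 =>
      if PySem.Int.floordiv t0 4 = PySem.Int.floordiv t1 4 ∧
         PySem.Int.floordiv t1 4 = PySem.Int.floordiv t2 4 then "10"
      else troisPokerLoop tab (PySem.List.pyRange 0 3 1)
  | _, _, _ => ""  -- IndexError (excluded by Pre_)

-- ===== PORT B =====
def troisPoker_alt (tab : List Int) : String :=
  match PySem.List.pyGet? tab 0, PySem.List.pyGet? tab 1, PySem.List.pyGet? tab 2 with
  | some t0, some t1, some t2 =>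
      let ranks : PySem.Set Int :=
        PySem.Set.ofList [PySem.Int.floordiv t0 4, PySem.Int.floordiv t1 4, PySem.Int.floordiv t2 4]
      if ranks.length = 1 then "10"
      else if ranks.length = 2 then "2"
      else ""
  | _, _, _ => ""  -- IndexError (excluded by Pre_)

-- ===== PRECONDITION & SPEC =====
-- A raises IndexError when tab has fewer than 3 elements.
def Pre_troisPoker (tab : List Int) : Prop := 3 ≤ tab.length
instance (tab : List Int) : Decidable (Pre_troisPoker tab) := by unfold Pre_troisPoker; infer_instance
def pvWitness_troisPoker : List Int := [0, 1, 2]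

-- On tabs longer than 3 cards whose first-three ranks have no adjacent pair, A's wrap-around
-- negative indexing makes it return '2' when the unrelated LAST element's rank equals the first card's
-- (spurious pair) or '' when the first and third card share a rank (missed pair); B returns the
-- classification of the three cards themselves, which is the intended value.
def D_troisPoker (tab : List Int) : Prop :=
  3 < tab.length ∧
  PySem.Int.floordiv (tab.getD 0 0) 4 ≠ PySem.Int.floordiv (tab.getD 1 0) 4 ∧
  PySem.Int.floordiv (tab.getD 1 0) 4 ≠ PySem.Int.floordiv (tab.getD 2 0) 4 ∧
  ((PySem.Int.floordiv (tab.getD (tab.length - 1) 0) 4 = PySem.Int.floordiv (tab.getD 0 0) 4) ↔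
   PySem.Int.floordiv (tab.getD 0 0) 4 ≠ PySem.Int.floordiv (tab.getD 2 0) 4)
instance (tab : List Int) : Decidable (D_troisPoker tab) := by unfold D_troisPoker; infer_instance

def Spec_troisPoker (tab : List Int) (out : String) : Prop := ¬ D_troisPoker tab → out = troisPoker_alt tab
instance (tab : List Int) (out : String) : Decidable (Spec_troisPoker tab out) := by unfold Spec_troisPoker; infer_instance

def pvDiffWitness_troisPoker : List Int := [0, 4, 1, 8]
def pvDiffWitnessOut_troisPoker : String × String := ("", "2")

-- ===== CLAIM (what is proved, stated in full; the proofs are below) =====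
def Claim_unchanged_troisPoker : Prop := ∀ (tab : List Int), Dom_troisPoker tab → Pre_troisPoker tab → Spec_troisPoker tab (troisPoker tab)
def Claim_changed_troisPoker : Prop := Dom_troisPoker (pvDiffWitness_troisPoker) ∧ Pre_troisPoker (pvDiffWitness_troisPoker) ∧ D_troisPoker (pvDiffWitness_troisPoker) ∧ troisPoker (pvDiffWitness_troisPoker) = pvDiffWitnessOut_troisPoker.1 ∧ troisPoker_alt (pvDiffWitness_troisPoker) = pvDiffWitnessOut_troisPoker.2 ∧ pvDiffWitnessOut_troisPoker.1 ≠ pvDiffWitnessOut_troisPoker.2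
def Claim_exact_troisPoker : Prop := ∀ (tab : List Int), Dom_troisPoker tab → Pre_troisPoker tab → D_troisPoker tab → troisPoker tab ≠ troisPoker_alt tab

-- ===== LEMMAS AND PROOFS =====

theorem pyRange03 : PySem.List.pyRange 0 3 1 = [0, 1, 2] := by decide

theorem get012 (a b c : Int) (r : List Int) :
    PySem.List.pyGet? (a :: b :: c :: r) 0 = some a ∧
    PySem.List.pyGet? (a :: b :: c :: r) 1 = some b ∧
    PySem.List.pyGet? (a :: b :: c :: r) 2 = some c := by
  refine ⟨?_, ?_, ?_⟩ <;>
    (simp [PySem.List.pyGet?, PySem.List.pyIdx?]; rw [if_pos (by omega)]; simp)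

theorem A_char (a b c : Int) (r : List Int) :
    troisPoker (a :: b :: c :: r) =
      (if PySem.Int.floordiv a 4 = PySem.Int.floordiv b 4 ∧
          PySem.Int.floordiv b 4 = PySem.Int.floordiv c 4 then "10"
       else if PySem.Int.floordiv ((a :: b :: c :: r).getLast (by simp)) 4 = PySem.Int.floordiv a 4 then "2"
       else if PySem.Int.floordiv a 4 = PySem.Int.floordiv b 4 then "2"
       else if PySem.Int.floordiv b 4 = PySem.Int.floordiv c 4 then "2"
       else "") := by
  obtain ⟨h0, h1, h2⟩ := get012 a b c r
  have hm1 : PySem.List.pyGet? (a :: b :: c :: r) (-1) =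
      some ((a :: b :: c :: r).getLast (by simp)) := by
    rw [PySem.List.pyGet?_neg_one, List.getLast?_eq_some_getLast]
  have e0 : (0:Int) - 1 = -1 := by norm_num
  have e1 : (1:Int) - 1 = 0 := by norm_num
  have e2 : (2:Int) - 1 = 1 := by norm_num
  simp only [troisPoker, h0, h1, h2, pyRange03, troisPokerLoop, e0, e1, e2, hm1]

theorem B_char (a b c : Int) (r : List Int) :
    troisPoker_alt (a :: b :: c :: r) =
      (if PySem.Int.floordiv a 4 = PySem.Int.floordiv b 4 ∧
          PySem.Int.floordiv b 4 = PySem.Int.floordiv c 4 then "10"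
       else if PySem.Int.floordiv a 4 = PySem.Int.floordiv b 4 ∨
               PySem.Int.floordiv b 4 = PySem.Int.floordiv c 4 ∨
               PySem.Int.floordiv a 4 = PySem.Int.floordiv c 4 then "2"
       else "") := by
  obtain ⟨h0, h1, h2⟩ := get012 a b c r
  simp only [troisPoker_alt, h0, h1, h2]
  by_cases hxy : PySem.Int.floordiv a 4 = PySem.Int.floordiv b 4 <;>
    by_cases hyz : PySem.Int.floordiv b 4 = PySem.Int.floordiv c 4 <;>
    by_cases hxz : PySem.Int.floordiv a 4 = PySem.Int.floordiv c 4 <;>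
    simp_all [PySem.Set.ofList, PySem.Set.add, PySem.Set.contains, eq_comm]

theorem last_getD (a b c : Int) (r : List Int) :
    (a :: b :: c :: r).getD ((a :: b :: c :: r).length - 1) 0 =
      (a :: b :: c :: r).getLast (by simp) := by
  rw [List.getLast_eq_getElem, List.getD_eq_getElem _ _ (by simp)]
  rfl

theorem rank_cases3 (x y z : Int) :
    (if x = y ∧ y = z then "10"
     else if z = x then "2" else if x = y then "2" else if y = z then "2" else "") =
      (if x = y ∧ y = z then "10" else if x = y ∨ y = z ∨ x = z then "2" else "") := by
  by_cases hxy : x = y <;> by_cases hyz : y = z <;> by_cases hxz : x = z <;>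
    simp_all [eq_comm]

theorem rank_cases4 (w x y z : Int) (h : ¬(x ≠ y ∧ y ≠ z ∧ (w = x ↔ x ≠ z))) :
    (if x = y ∧ y = z then "10"
     else if w = x then "2" else if x = y then "2" else if y = z then "2" else "") =
      (if x = y ∧ y = z then "10" else if x = y ∨ y = z ∨ x = z then "2" else "") := by
  by_cases hxy : x = y <;> by_cases hyz : y = z <;> by_cases hwx : w = x <;>
    by_cases hxz : x = z <;> simp_all [eq_comm]

theorem rank_cases4_ne (w x y z : Int) (hxy : x ≠ y) (hyz : y ≠ z) (hiff : w = x ↔ x ≠ z) :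
    (if x = y ∧ y = z then "10"
     else if w = x then "2" else if x = y then "2" else if y = z then "2" else "") ≠
      (if x = y ∧ y = z then "10" else if x = y ∨ y = z ∨ x = z then "2" else "") := by
  by_cases hwx : w = x
  · have hxz : x ≠ z := hiff.mp hwx
    clear hiff
    split_ifs <;> first | decide | tauto
  · have hxz : x = z := not_not.mp (fun h => hwx (hiff.mpr h))
    clear hiff
    split_ifs <;> first | decide | tauto

-- ===== VERDICT (by name: the statement is the Claim_ definition above) =====
theorem troisPoker_spec : Claim_unchanged_troisPoker := by
  intro tab hdom hpre hD
  clear hdom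
  match tab, hpre with
  | a :: b :: c :: r, _ =>
    rw [A_char, B_char]
    unfold D_troisPoker at hD
    simp only [List.getD_cons_zero, List.getD_cons_succ] at hD
    rw [last_getD] at hD
    cases r with
    | nil =>
      have hw : PySem.Int.floordiv (([a, b, c] : List Int).getLast (by simp)) 4 =
          PySem.Int.floordiv c 4 := rfl
      rw [hw]
      exact rank_cases3 _ _ _
    | cons r0 rs =>
      have hlen : 3 < (a :: b :: c :: r0 :: rs).length := by simp
      refine rank_cases4 _ _ _ _ (fun hc => hD ⟨hlen, hc⟩)

theorem troisPoker_changed : Claim_changed_troisPoker := by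
  unfold Claim_changed_troisPoker; decide

theorem troisPoker_tight : Claim_exact_troisPoker := by
  intro tab hdom hpre hD
  clear hdom
  match tab, hpre with
  | a :: b :: c :: r, _ =>
    rw [A_char, B_char]
    unfold D_troisPoker at hD
    simp only [List.getD_cons_zero, List.getD_cons_succ] at hD
    rw [last_getD] at hD
    obtain ⟨-, hxy, hyz, hiff⟩ := hD
    exact rank_cases4_ne _ _ _ _ hxy hyz hiff
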